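-- pv_equiv track=rewrite | github.com/saketkumarjha/caresetuAgent_3.0 | knowledge/engines/domain_expertise.py | _generate_legal_questions
-- ===== SOURCE A (Python) =====
-- from typing import Dict, List, Optional, Tuple, Any
--
-- def _generate_legal_questions(query_lower: str, expertise_level: str) -> List[str]:
--     """Generate legal-specific clarifying questions."""
--     questions = []
--
--     if "policy" in query_lower:
--         questions.extend([
--             "Are you asking about our privacy policy, terms of service, or another specific policy?",
--             "Is this related to compliance requirements or general policy information?"
--         ])
--
--     elif any(term in query_lower for term in ["rights", "legal", "law"]):
--         if expertise_level == "basic":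
--             questions.extend([
--                 "Are you asking about your rights as a customer or patient?",
--                 "Do you need help understanding a specific legal requirement?"
--             ])
--         else:
--             questions.extend([
--                 "Are you seeking information about statutory rights or contractual obligations?",
--                 "Is this related to regulatory compliance or dispute resolution?"
--             ])
--
--     elif any(term in query_lower for term in ["contract", "agreement", "terms"]):
--         questions.extend([
--             "Are you asking about existing terms or negotiating new agreements?",
--             "Do you need clarification on specific contractual provisions?"
--         ])
--
--     elif "privacy" in query_lower:
--         questions.extend([
--             "Are you asking about data privacy rights or information handling practices?",
--             "Is this related to a specific privacy concern or general policy?"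
--         ])
--
--     return questions
-- ===== SOURCE B (Python) =====
-- from typing import Dict, List, Tuple
--
-- # Flat keyword -> category priority (0 = highest precedence).
-- _KEYWORD_PRIORITY: Dict[str, int] = {
--     "policy": 0,
--     "rights": 1, "legal": 1, "law": 1,
--     "contract": 2, "agreement": 2, "terms": 2,
--     "privacy": 3,
-- }
--
-- # (category, tier) -> questions.
-- _QUESTIONS: Dict[Tuple[int, str], List[str]] = {
--     (0, "basic"): [
--         "Are you asking about our privacy policy, terms of service, or another specific policy?",
--         "Is this related to compliance requirements or general policy information?"],
--     (1, "basic"): [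
--         "Are you asking about your rights as a customer or patient?",
--         "Do you need help understanding a specific legal requirement?"],
--     (1, "advanced"): [
--         "Are you seeking information about statutory rights or contractual obligations?",
--         "Is this related to regulatory compliance or dispute resolution?"],
--     (2, "basic"): [
--         "Are you asking about existing terms or negotiating new agreements?",
--         "Do you need clarification on specific contractual provisions?"],
--     (3, "basic"): [
--         "Are you asking about data privacy rights or information handling practices?",
--         "Is this related to a specific privacy concern or general policy?"],
-- }
--
-- def _generate_legal_questions(query_lower: str, expertise_level: str) -> List[str]:
--     """Generate legal-specific clarifying questions (match-set + min-priority version)."""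
--     hits = [prio for kw, prio in _KEYWORD_PRIORITY.items() if kw in query_lower]
--     if not hits:
--         return []
--     cat = min(hits)
--     tier = "basic" if (cat != 1 or expertise_level == "basic") else "advanced"
--     return _QUESTIONS[(cat, tier)]
-- ===== Notes on version B (the rewrite author's own statement) =====
-- stated objective: alternative
-- what changed: Instead of A's short-circuiting if/elif chain, B builds the full set of matched keyword priorities from a flat keyword->priority map, takes the minimum priority, and returns the questions from a (category, tier)-keyed table.
import Mathlib
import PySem

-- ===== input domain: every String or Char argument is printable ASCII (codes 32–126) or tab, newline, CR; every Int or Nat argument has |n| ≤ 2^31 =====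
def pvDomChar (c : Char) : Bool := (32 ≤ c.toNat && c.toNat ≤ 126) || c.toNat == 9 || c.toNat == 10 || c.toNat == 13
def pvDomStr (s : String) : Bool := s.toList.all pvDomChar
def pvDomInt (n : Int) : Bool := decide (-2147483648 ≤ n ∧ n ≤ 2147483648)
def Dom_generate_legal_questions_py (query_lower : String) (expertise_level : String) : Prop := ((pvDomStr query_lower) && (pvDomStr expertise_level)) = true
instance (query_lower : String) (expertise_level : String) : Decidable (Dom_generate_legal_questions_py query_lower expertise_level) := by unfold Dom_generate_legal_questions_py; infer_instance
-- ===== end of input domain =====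

-- B replaces A's first-match if/elif chain by computing the full set of keyword hits from a
-- flat keyword->priority map, taking the minimum priority, and looking the questions up in a
-- (category, tier)-keyed table (objective: alternative).

-- ===== PORT A =====
-- Literal transliteration of A's if/elif chain; 'questions' starts empty and the matched branch extends it.
def generate_legal_questions_py (query_lower : String) (expertise_level : String) : List String :=
  let questions : List String := []
  if PySem.Str.isIn "policy" query_lower then
    questions ++ ["Are you asking about our privacy policy, terms of service, or another specific policy?",
      "Is this related to compliance requirements or general policy information?"]
  else if ["rights", "legal", "law"].any (fun term => PySem.Str.isIn term query_lower) then
    if expertise_level == "basic" then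
      questions ++ ["Are you asking about your rights as a customer or patient?",
        "Do you need help understanding a specific legal requirement?"]
    else
      questions ++ ["Are you seeking information about statutory rights or contractual obligations?",
        "Is this related to regulatory compliance or dispute resolution?"]
  else if ["contract", "agreement", "terms"].any (fun term => PySem.Str.isIn term query_lower) then
    questions ++ ["Are you asking about existing terms or negotiating new agreements?",
      "Do you need clarification on specific contractual provisions?"]
  else if PySem.Str.isIn "privacy" query_lower then
    questions ++ ["Are you asking about data privacy rights or information handling practices?",
      "Is this related to a specific privacy concern or general policy?"]
  else questions

-- ===== PORT B =====
-- Flat keyword -> category priority map (Python dict, ported as assoc list in insertion order).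
def legalKeywordPriority : List (String × Int) :=
  [("policy", 0), ("rights", 1), ("legal", 1), ("law", 1),
   ("contract", 2), ("agreement", 2), ("terms", 2), ("privacy", 3)]

-- (category, tier) -> questions table.
def legalQuestionsTable : List ((Int × String) × List String) :=
  [((0, "basic"),
    ["Are you asking about our privacy policy, terms of service, or another specific policy?",
     "Is this related to compliance requirements or general policy information?"]),
   ((1, "basic"),
    ["Are you asking about your rights as a customer or patient?",
     "Do you need help understanding a specific legal requirement?"]),
   ((1, "advanced"),
    ["Are you seeking information about statutory rights or contractual obligations?",
     "Is this related to regulatory compliance or dispute resolution?"]),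
   ((2, "basic"),
    ["Are you asking about existing terms or negotiating new agreements?",
     "Do you need clarification on specific contractual provisions?"]),
   ((3, "basic"),
    ["Are you asking about data privacy rights or information handling practices?",
     "Is this related to a specific privacy concern or general policy?"])]

-- B: collect the priorities of ALL matching keywords, take the minimum, look up the questions.
def generate_legal_questions_py_alt (query_lower : String) (expertise_level : String) : List String :=
  let hits := (legalKeywordPriority.filter (fun p => PySem.Str.isIn p.1 query_lower)).map Prod.snd
  match PySem.List.min? hits (fun x => x) with
  | none => []
  | some cat =>
    let tier := if cat != 1 || expertise_level == "basic" then "basic" else "advanced"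
    -- Python's _QUESTIONS[(cat, tier)]: first-match lookup in the assoc list (key always present)
    ((legalQuestionsTable.find? (fun p => p.1 == (cat, tier))).map Prod.snd).getD []

-- ===== PRECONDITION & SPEC =====
def Spec_generate_legal_questions_py (query_lower : String) (expertise_level : String) (out : List String) : Prop := out = generate_legal_questions_py_alt query_lower expertise_level
instance (query_lower : String) (expertise_level : String) (out : List String) : Decidable (Spec_generate_legal_questions_py query_lower expertise_level out) := by unfold Spec_generate_legal_questions_py; infer_instance

-- ===== CLAIM (what is proved, stated in full; the proofs are below) =====
def Claim_equal_generate_legal_questions_py : Prop := ∀ (query_lower : String) (expertise_level : String), Dom_generate_legal_questions_py query_lower expertise_level → Spec_generate_legal_questions_py query_lower expertise_level (generate_legal_questions_py query_lower expertise_level)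

-- ===== LEMMAS AND PROOFS =====

-- min? with the identity key returns a whenever a is a member and a lower bound.
lemma pvMinEq (l : List Int) (a : Int) (h1 : a ∈ l) (h2 : ∀ y ∈ l, a ≤ y) :
    PySem.List.min? l (fun x => x) = some a := by
  cases hm : PySem.List.min? l (fun x => x) with
  | none =>
    rw [PySem.List.min?_eq_none_iff] at hm
    subst hm; cases h1
  | some m =>
    have h3 : m ≤ a := PySem.List.min?_isMin hm a h1
    have h4 : a ≤ m := h2 m (PySem.List.min?_mem hm)
    have : m = a := le_antisymm h3 h4
    rw [this]

-- characterisation of the priorities collected by B's filter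
set_option maxHeartbeats 1000000 in
lemma pvMemHits (q : String) (a : Int) :
    a ∈ (legalKeywordPriority.filter (fun p => PySem.Str.isIn p.1 q)).map Prod.snd ↔
      (a = 0 ∧ PySem.Str.isIn "policy" q = true) ∨
      (a = 1 ∧ (PySem.Str.isIn "rights" q = true ∨ PySem.Str.isIn "legal" q = true ∨ PySem.Str.isIn "law" q = true)) ∨
      (a = 2 ∧ (PySem.Str.isIn "contract" q = true ∨ PySem.Str.isIn "agreement" q = true ∨ PySem.Str.isIn "terms" q = true)) ∨
      (a = 3 ∧ PySem.Str.isIn "privacy" q = true) := by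
  simp only [legalKeywordPriority, List.mem_map, List.mem_filter, List.mem_cons,
    List.not_mem_nil, or_false]
  constructor
  · rintro ⟨p, ⟨hmem, hf⟩, hpa⟩
    rcases hmem with h | h | h | h | h | h | h | h <;> subst h <;> subst hpa
    · exact Or.inl ⟨rfl, hf⟩
    · exact Or.inr (Or.inl ⟨rfl, Or.inl hf⟩)
    · exact Or.inr (Or.inl ⟨rfl, Or.inr (Or.inl hf)⟩)
    · exact Or.inr (Or.inl ⟨rfl, Or.inr (Or.inr hf)⟩)
    · exact Or.inr (Or.inr (Or.inl ⟨rfl, Or.inl hf⟩))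
    · exact Or.inr (Or.inr (Or.inl ⟨rfl, Or.inr (Or.inl hf)⟩))
    · exact Or.inr (Or.inr (Or.inl ⟨rfl, Or.inr (Or.inr hf)⟩))
    · exact Or.inr (Or.inr (Or.inr ⟨rfl, hf⟩))
  · rintro (⟨rfl, hf⟩ | ⟨rfl, hf | hf | hf⟩ | ⟨rfl, hf | hf | hf⟩ | ⟨rfl, hf⟩)
    · exact ⟨("policy", 0), ⟨Or.inl rfl, hf⟩, rfl⟩
    · exact ⟨("rights", 1), ⟨Or.inr (Or.inl rfl), hf⟩, rfl⟩
    · exact ⟨("legal", 1), ⟨Or.inr (Or.inr (Or.inl rfl)), hf⟩, rfl⟩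
    · exact ⟨("law", 1), ⟨Or.inr (Or.inr (Or.inr (Or.inl rfl))), hf⟩, rfl⟩
    · exact ⟨("contract", 2), ⟨Or.inr (Or.inr (Or.inr (Or.inr (Or.inl rfl)))), hf⟩, rfl⟩
    · exact ⟨("agreement", 2), ⟨Or.inr (Or.inr (Or.inr (Or.inr (Or.inr (Or.inl rfl))))), hf⟩, rfl⟩
    · exact ⟨("terms", 2), ⟨Or.inr (Or.inr (Or.inr (Or.inr (Or.inr (Or.inr (Or.inl rfl)))))), hf⟩, rfl⟩
    · exact ⟨("privacy", 3), ⟨Or.inr (Or.inr (Or.inr (Or.inr (Or.inr (Or.inr (Or.inr rfl)))))), hf⟩, rfl⟩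

-- ===== VERDICT (by name: the statement is the Claim_ definition above) =====
set_option maxHeartbeats 1000000 in
theorem generate_legal_questions_py_spec : Claim_equal_generate_legal_questions_py := by
  intro q e _
  unfold Spec_generate_legal_questions_py generate_legal_questions_py generate_legal_questions_py_alt
  simp only [List.any_cons, List.any_nil, Bool.or_false, List.nil_append]
  by_cases h1 : PySem.Str.isIn "policy" q = true
  · have hmin : PySem.List.min? ((legalKeywordPriority.filter (fun p => PySem.Str.isIn p.1 q)).map Prod.snd) (fun x => x) = some 0 :=
      pvMinEq _ _ (by rw [pvMemHits]; exact Or.inl ⟨rfl, h1⟩)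
        (by intro y hy; rw [pvMemHits] at hy
            rcases hy with ⟨h, _⟩ | ⟨h, _⟩ | ⟨h, _⟩ | ⟨h, _⟩ <;> omega)
    rw [if_pos h1, hmin]
    rfl
  · rw [if_neg h1]
    by_cases h2 : (PySem.Str.isIn "rights" q || (PySem.Str.isIn "legal" q || PySem.Str.isIn "law" q)) = true
    · have h2' := h2
      simp only [Bool.or_eq_true] at h2'
      have hmin : PySem.List.min? ((legalKeywordPriority.filter (fun p => PySem.Str.isIn p.1 q)).map Prod.snd) (fun x => x) = some 1 :=
        pvMinEq _ _ (by rw [pvMemHits]; exact Or.inr (Or.inl ⟨rfl, h2'⟩))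
          (by intro y hy; rw [pvMemHits] at hy
              rcases hy with ⟨h, hp⟩ | ⟨h, _⟩ | ⟨h, _⟩ | ⟨h, _⟩
              · exact absurd hp h1
              all_goals omega)
      rw [if_pos h2, hmin]
      cases he : e == "basic" <;> rfl
    · rw [if_neg h2]
      by_cases h3 : (PySem.Str.isIn "contract" q || (PySem.Str.isIn "agreement" q || PySem.Str.isIn "terms" q)) = true
      · have h3' := h3
        simp only [Bool.or_eq_true] at h3'
        have h2n : ¬ (PySem.Str.isIn "rights" q = true ∨ PySem.Str.isIn "legal" q = true ∨ PySem.Str.isIn "law" q = true) := by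
          simp only [Bool.or_eq_true] at h2; exact h2
        have hmin : PySem.List.min? ((legalKeywordPriority.filter (fun p => PySem.Str.isIn p.1 q)).map Prod.snd) (fun x => x) = some 2 :=
          pvMinEq _ _ (by rw [pvMemHits]; exact Or.inr (Or.inr (Or.inl ⟨rfl, h3'⟩)))
            (by intro y hy; rw [pvMemHits] at hy
                rcases hy with ⟨h, hp⟩ | ⟨h, hp⟩ | ⟨h, _⟩ | ⟨h, _⟩
                · exact absurd hp h1
                · exact absurd hp h2n
                all_goals omega)
        rw [if_pos h3, hmin]
        rfl
      · rw [if_neg h3]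
        have h2n : ¬ (PySem.Str.isIn "rights" q = true ∨ PySem.Str.isIn "legal" q = true ∨ PySem.Str.isIn "law" q = true) := by
          simp only [Bool.or_eq_true] at h2; exact h2
        have h3n : ¬ (PySem.Str.isIn "contract" q = true ∨ PySem.Str.isIn "agreement" q = true ∨ PySem.Str.isIn "terms" q = true) := by
          simp only [Bool.or_eq_true] at h3; exact h3
        by_cases h4 : PySem.Str.isIn "privacy" q = true
        · have hmin : PySem.List.min? ((legalKeywordPriority.filter (fun p => PySem.Str.isIn p.1 q)).map Prod.snd) (fun x => x) = some 3 :=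
            pvMinEq _ _ (by rw [pvMemHits]; exact Or.inr (Or.inr (Or.inr ⟨rfl, h4⟩)))
              (by intro y hy; rw [pvMemHits] at hy
                  rcases hy with ⟨h, hp⟩ | ⟨h, hp⟩ | ⟨h, hp⟩ | ⟨h, _⟩
                  · exact absurd hp h1
                  · exact absurd hp h2n
                  · exact absurd hp h3n
                  · omega)
          rw [if_pos h4, hmin]
          rfl
        · rw [if_neg h4]
          have hnil : (legalKeywordPriority.filter (fun p => PySem.Str.isIn p.1 q)).map Prod.snd = [] := by
            rw [List.eq_nil_iff_forall_not_mem]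
            intro a ha
            rw [pvMemHits] at ha
            rcases ha with ⟨_, hp⟩ | ⟨_, hp⟩ | ⟨_, hp⟩ | ⟨_, hp⟩
            · exact absurd hp h1
            · exact absurd hp h2n
            · exact absurd hp h3n
            · exact absurd hp h4
          have hmin : PySem.List.min? ((legalKeywordPriority.filter (fun p => PySem.Str.isIn p.1 q)).map Prod.snd) (fun x => x) = none := by
            rw [PySem.List.min?_eq_none_iff, hnil]
          rw [hmin]
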